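-- pv_equiv track=rewrite | github.com/jasonhklee0408/Basic-Data-Structures | hw06.py | undo_recursive_reverse_up_to_n
-- ===== SOURCE A (Python) =====
-- def undo_recursive_reverse_up_to_n(name, n):
--     """
--     Recursively corrects the recursive reverse
--     done on the string up to n characters.
--
--     Restrictions:
--     You should use recursion. You should do input validation.
--
--     Parameters:
--     name (str): The string to be corrected
--     n (int): How many times the string has been previously reversed
--
--     Returns:
--     (str) Corrected string
--
--     Parameters:
--     name (str): The string to be corrected
--     n (int): How many times the string has been previously reversed
--
--     Returns:
--     (str) Corrected string
--
--     >>> undo_recursive_reverse_up_to_n('bNai', 3)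
--     'Nabi'
--     >>> undo_recursive_reverse_up_to_n('mkln', 3)
--     'klmn'
--     >>> undo_recursive_reverse_up_to_n('nlkm', 4)
--     'klmn'
--
--     +++++++++++++++++++++++++
--     WRITE YOUR DOCTESTS BELOW
--     +++++++++++++++++++++++++
--     >>> undo_recursive_reverse_up_to_n('Voy', 3)
--     'oyV'
--     >>> undo_recursive_reverse_up_to_n('Voy', '3')
--     Traceback (most recent call last):
--     ...
--     AssertionError
--     >>> undo_recursive_reverse_up_to_n(123, 4)
--     Traceback (most recent call last):
--     ...
--     AssertionError
--     """
--     assert isinstance(name, str)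
--     assert isinstance(n, int)
--     assert n > 0
--
--     if n == 1:
--         return name
--     else:
--         sliced_name = name[:n]
--         edited_name = sliced_name[::-1] + name[n:]
--         return undo_recursive_reverse_up_to_n(edited_name, n-1)
-- ===== SOURCE B (Python) =====
-- def undo_recursive_reverse_up_to_n(name, n):
--     assert isinstance(name, str)
--     assert isinstance(n, int)
--     assert n > 0
--
--     L = len(name)
--     s = name
--     m = n
--     if n > L:
--         # every reversal of length > L flips the whole string: only parity matters
--         if (n - L) % 2 == 1:
--             s = name[::-1]
--         m = L
--     if m < 2:
--         return s
--     # net permutation of the prefix reversals of lengths m, m-1, ..., 2 in one pass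
--     mid = [s[(i + m) // 2] if i % 2 == m % 2 else s[(m - 1 - i) // 2] for i in range(m)]
--     return ''.join(mid) + s[m:]
-- ===== Notes on version B (the rewrite author's own statement) =====
-- stated objective: faster
-- what changed: Replaced the n-deep recursion of successive prefix reversals by a closed-form computation of the net character permutation (one pass over the string), reducing the n>len(name) whole-string reversals to a parity test.
import Mathlib
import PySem

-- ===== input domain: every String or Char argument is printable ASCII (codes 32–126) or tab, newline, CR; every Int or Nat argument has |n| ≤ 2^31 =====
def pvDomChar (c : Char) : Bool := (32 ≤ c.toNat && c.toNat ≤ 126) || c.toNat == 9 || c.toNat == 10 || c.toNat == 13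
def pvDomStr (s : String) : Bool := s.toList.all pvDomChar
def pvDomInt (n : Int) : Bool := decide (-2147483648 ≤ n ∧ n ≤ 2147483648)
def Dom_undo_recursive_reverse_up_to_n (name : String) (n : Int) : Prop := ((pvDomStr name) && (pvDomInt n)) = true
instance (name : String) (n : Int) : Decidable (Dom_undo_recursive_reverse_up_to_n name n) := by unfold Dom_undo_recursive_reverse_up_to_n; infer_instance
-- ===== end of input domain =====

-- B replaces A's n-deep recursion of prefix reversals by the closed-form net permutation (one pass); proved equal on n ≥ 1.


-- ===== PORT A =====
-- A's recursion, on the code points: name[:n] / name[n:] are PySem.List.slice;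
-- sliced_name[::-1] is List.reverse (exact by PySem.List.slice?_none_none_neg_one).
-- The `n ≤ 1` guard returns at n = 1 as A does; n ≤ 0 (A's AssertionError) is outside Pre_.
def undoA (cs : List Char) (n : Int) : List Char :=
  if _h : n ≤ 1 then cs
  else
    undoA ((PySem.List.slice cs none (some n)).reverse ++ PySem.List.slice cs (some n) none) (n - 1)
termination_by n.toNat
decreasing_by omega

def undo_recursive_reverse_up_to_n (name : String) (n : Int) : String :=
  String.ofList (undoA name.toList n)

-- ===== PORT B =====
-- the list comprehension of Source B (indices are provably in range, so plain getD ports s[...])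
def altMid (s : List Char) (m : Nat) : List Char :=
  (List.range m).map (fun i =>
    if i % 2 = m % 2 then s.getD ((i + m) / 2) ' ' else s.getD ((m - 1 - i) / 2) ' ')

def undo_recursive_reverse_up_to_n_alt (name : String) (n : Int) : String :=
  let cs := name.toList
  let L : Int := (cs.length : Int)
  let s := if L < n ∧ PySem.Int.mod (n - L) 2 = 1 then cs.reverse else cs
  let m : Int := if L < n then L else n
  if m < 2 then String.ofList s
  else String.ofList (altMid s m.toNat ++ s.drop m.toNat)

-- ===== PRECONDITION & SPEC =====
-- A asserts n > 0 (AssertionError otherwise); B asserts the same.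
def Pre_undo_recursive_reverse_up_to_n (name : String) (n : Int) : Prop := 1 ≤ n
instance (name : String) (n : Int) : Decidable (Pre_undo_recursive_reverse_up_to_n name n) := by unfold Pre_undo_recursive_reverse_up_to_n; infer_instance

def pvWitness_undo_recursive_reverse_up_to_n : String × Int := ("bNai", 3)

def Spec_undo_recursive_reverse_up_to_n (name : String) (n : Int) (out : String) : Prop := out = undo_recursive_reverse_up_to_n_alt name n
instance (name : String) (n : Int) (out : String) : Decidable (Spec_undo_recursive_reverse_up_to_n name n out) := by unfold Spec_undo_recursive_reverse_up_to_n; infer_instance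

-- ===== CLAIM (what is proved, stated in full; the proofs are below) =====
def Claim_equal_undo_recursive_reverse_up_to_n : Prop := ∀ (name : String) (n : Int), Dom_undo_recursive_reverse_up_to_n name n → Pre_undo_recursive_reverse_up_to_n name n → Spec_undo_recursive_reverse_up_to_n name n (undo_recursive_reverse_up_to_n name n)

-- ===== LEMMAS AND PROOFS =====

-- reverse-the-first-k step, the body of A's recursion
def rp (k : Nat) (s : List Char) : List Char := (s.take k).reverse ++ s.drop k

-- A's recursion, Nat-indexed
def F (s : List Char) (m : Nat) : List Char :=
  match m with
  | 0 => s
  | 1 => s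
  | (k+2) => F (rp (k+2) s) (k+1)

lemma length_rp (k : Nat) (s : List Char) : (rp k s).length = s.length := by
  simp [rp]; omega

lemma rp_of_le (k : Nat) (s : List Char) (h : s.length ≤ k) : rp k s = s.reverse := by
  simp [rp, List.take_of_length_le h, List.drop_eq_nil_of_le h]

lemma F_nil (m : Nat) : F [] m = [] := by
  induction m using Nat.strong_induction_on with
  | _ m ih =>
    match m with
    | 0 => rfl
    | 1 => rfl
    | (k+2) => simp only [F, rp]; simpa using ih (k+1) (by omega)

lemma rp_getD (k j : Nat) (s : List Char) (hk : k ≤ s.length) (hj : j < k) :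
    (rp k s).getD j ' ' = s.getD (k - 1 - j) ' ' := by
  have h1 : j < (rp k s).length := by rw [length_rp]; omega
  have h2 : k - 1 - j < s.length := by omega
  rw [List.getD_eq_getElem _ _ h1, List.getD_eq_getElem _ _ h2]
  show (rp k s)[j] = _
  simp only [rp] at h1 ⊢
  rw [List.getElem_append_left (by simp; omega), List.getElem_reverse, List.getElem_take]
  congr 1
  simp
  omega

lemma undoA_eq_F (m : Nat) : ∀ (n : Int) (cs : List Char), n.toNat = m → 1 ≤ n →
    undoA cs n = F cs m := by
  induction m using Nat.strong_induction_on with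
  | _ m ih =>
    intro n cs hm hn
    by_cases h1 : n ≤ 1
    · have : n = 1 := le_antisymm h1 hn
      subst this
      simp at hm; subst hm
      rw [undoA]; rfl
    · have h2 : (2:Int) ≤ n := by omega
      obtain ⟨k, hk⟩ : ∃ k, m = k + 2 := ⟨m - 2, by omega⟩
      subst hk
      rw [undoA]
      simp only [h1, dite_false]
      rw [PySem.List.slice_to cs (by omega), PySem.List.slice_from cs (by omega)]
      have : undoA ((cs.take n.toNat).reverse ++ cs.drop n.toNat) (n - 1)
           = F ((cs.take n.toNat).reverse ++ cs.drop n.toNat) (k+1) :=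
        ih (k+1) (by omega) (n-1) _ (by omega) (by omega)
      rw [this]
      have hrp : (cs.take n.toNat).reverse ++ cs.drop n.toNat = rp (k+2) cs := by
        simp only [rp, ← hm]
      rw [hrp]; rfl

lemma drop_rp (k : Nat) (s : List Char) (h1 : 1 ≤ k) (hk : k ≤ s.length) :
    (rp k s).drop (k - 1) = s.getD 0 ' ' :: s.drop k := by
  have hrev : ((s.take k).reverse).length = k := by simp; omega
  simp only [rp]; rw [List.drop_append_of_le_length (by omega)]
  have : (s.take k).reverse.drop (k-1) = [(s.take k).reverse[k-1]'(by omega)] := by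
    apply List.ext_getElem
    · simp; omega
    · intro i hi hi'
      simp at hi'
      have : i = 0 := by omega
      subst this
      simp
  rw [this, List.getElem_reverse, List.getElem_take, List.singleton_append]
  congr 1
  · rw [List.getD_eq_getElem _ _ (by omega : 0 < s.length)]
    congr 1
    simp; omega

lemma altMid_step (k : Nat) (s : List Char) (hk : k + 2 ≤ s.length) :
    altMid s (k + 2) = altMid (rp (k+2) s) (k+1) ++ [s.getD 0 ' '] := by
  unfold altMid
  rw [List.range_succ, List.map_append]
  congr 1
  · apply List.map_congr_left
    intro i hi
    have hi' : i < k + 1 := by simpa using hi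
    by_cases h : i % 2 = (k+1) % 2
    · have h2 : ¬ (i % 2 = (k+2) % 2) := by omega
      rw [if_neg h2, if_pos h]
      rw [rp_getD (k+2) ((i + (k+1))/2) s hk (by omega)]
      congr 1; omega
    · have h2 : i % 2 = (k+2) % 2 := by omega
      rw [if_pos h2, if_neg h]
      rw [rp_getD (k+2) ((k + 1 - 1 - i)/2) s hk (by omega)]
      congr 1; omega
  · simp only [List.map_cons, List.map_nil]
    have h : ¬ ((k+1) % 2 = (k+2) % 2) := by omega
    rw [if_neg h]
    congr 2
    omega

lemma F_eq_mid (m : Nat) : ∀ (s : List Char), m ≤ s.length →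
    F s m = altMid s m ++ s.drop m := by
  induction m using Nat.strong_induction_on with
  | _ m ih =>
    intro s hm
    match m with
    | 0 => simp [F, altMid]
    | 1 =>
      cases s with
      | nil => simp at hm
      | cons a t => simp [F, altMid, List.range_succ]
    | (k+2) =>
      have hlen : (rp (k+2) s).length = s.length := length_rp _ _
      rw [show F s (k+2) = F (rp (k+2) s) (k+1) from rfl,
          ih (k+1) (by omega) _ (by omega),
          altMid_step k s hm,
          show (k+1) = (k+2) - 1 from rfl,
          drop_rp (k+2) s (by omega) hm]
      simp

lemma F_beyond (k : Nat) : ∀ (s : List Char),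
    F s (s.length + k) = F (if k % 2 = 1 then s.reverse else s) s.length := by
  induction k with
  | zero => intro s; simp
  | succ k ih =>
    intro s
    rcases Nat.eq_zero_or_pos s.length with h0 | hpos
    · have hs : s = [] := List.eq_nil_of_length_eq_zero h0
      subst hs
      simp [F_nil]
    · obtain ⟨j, hj⟩ : ∃ j, s.length + (k+1) = j + 2 := ⟨s.length + k - 1, by omega⟩
      rw [hj, show F s (j+2) = F (rp (j+2) s) (j+1) from rfl,
          rp_of_le (j+2) s (by omega),
          show j + 1 = s.reverse.length + k by simp; omega,
          ih s.reverse]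
      have hlr : s.reverse.length = s.length := by simp
      rw [hlr]
      by_cases hp : k % 2 = 1
      · have hp2 : ¬ ((k+1) % 2 = 1) := by omega
        simp [hp, hp2]
      · have hp2 : (k+1) % 2 = 1 := by omega
        simp [hp, hp2]

-- ===== VERDICT (by name: the statement is the Claim_ definition above) =====
theorem undo_recursive_reverse_up_to_n_spec : Claim_equal_undo_recursive_reverse_up_to_n := by
  intro name n _hdom hn
  unfold Spec_undo_recursive_reverse_up_to_n undo_recursive_reverse_up_to_n
      undo_recursive_reverse_up_to_n_alt
  have hn1 : (1:Int) ≤ n := hn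
  set cs := name.toList with hcs
  have hA : undoA cs n = F cs n.toNat := undoA_eq_F n.toNat n cs rfl hn1
  simp only []
  by_cases hbig : (cs.length : Int) < n
  · -- n > L : parity of whole-string reversals, then the full permutation at m = L
    have hkpos : cs.length < n.toNat := by omega
    set k : Nat := n.toNat - cs.length with hk
    have hnk : n.toNat = cs.length + k := by omega
    have hmod : PySem.Int.mod (n - (cs.length:Int)) 2 = 1 ↔ k % 2 = 1 := by
      rw [PySem.Int.mod_eq_emod_of_pos (by omega)]
      omega
    set s' : List Char := if k % 2 = 1 then cs.reverse else cs with hs'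
    have hcond : (if (cs.length : Int) < n ∧ PySem.Int.mod (n - (cs.length:Int)) 2 = 1
        then cs.reverse else cs) = s' := by
      by_cases hp : k % 2 = 1
      · rw [if_pos ⟨hbig, hmod.mpr hp⟩, hs', if_pos hp]
      · rw [if_neg (by rw [hmod]; tauto), hs', if_neg hp]
    have hs'len : s'.length = cs.length := by
      rw [hs']; by_cases hp : k % 2 = 1 <;> simp [hp]
    have hF : undoA cs n = F s' cs.length := by
      rw [hA, hnk, F_beyond k cs, hs']
    rw [hcond, if_pos hbig]
    by_cases hsmall : (cs.length : Int) < 2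
    · rw [if_pos hsmall]
      have : cs.length ≤ 1 := by omega
      have hFs : F s' cs.length = s' := by
        interval_cases h : cs.length <;> rfl
      rw [hF, hFs]
    · rw [if_neg hsmall]
      rw [hF, F_eq_mid cs.length s' (by omega)]
      simp
  · -- n ≤ L : the permutation acts on the prefix of length n
    have hcond : (if (cs.length : Int) < n ∧ PySem.Int.mod (n - (cs.length:Int)) 2 = 1
        then cs.reverse else cs) = cs := by
      rw [if_neg]; tauto
    rw [hcond, if_neg hbig]
    by_cases hsmall : n < 2
    · have : n = 1 := by omega
      subst this
      rw [if_pos (by norm_num)]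
      rw [hA]; rfl
    · rw [if_neg hsmall]
      rw [hA, F_eq_mid n.toNat cs (by omega)]
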